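-- pv_equiv track=rewrite | github.com/SvenPaterson/NI-DAQmx-Task-Runner | main.py | _normalize_unit_name
-- ===== SOURCE A (Python) =====
-- from typing import Any, Dict, List, Optional
--
-- def _normalize_unit_name(raw: str) -> str:
--     if not raw:
--         return ""
--     cleaned = str(raw).replace("_", " ").replace("-", " ")
--     with_spaces: List[str] = []
--     prev_is_lower = False
--     for ch in cleaned:
--         if prev_is_lower and ch.isupper():
--             with_spaces.append(" ")
--         with_spaces.append(ch)
--         prev_is_lower = ch.islower()
--     normalized = " ".join("".join(with_spaces).split())
--     return normalized.upper()
-- ===== SOURCE B (Python) =====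
-- def _normalize_unit_name(raw: str) -> str:
--     if not raw:
--         return ""
--     parts = []
--     for tok in raw.replace("_", " ").replace("-", " ").split():
--         cur = tok[0]
--         for a, b in zip(tok, tok[1:]):
--             if a.islower() and b.isupper():
--                 parts.append(cur)
--                 cur = b
--             else:
--                 cur += b
--         parts.append(cur)
--     return " ".join(parts).upper()
-- ===== Notes on version B (the rewrite author's own statement) =====
-- stated objective: alternative
-- what changed: A runs one char-by-char state machine that inserts spaces into the whole string and then re-splits it; B first tokenizes with split() and then cuts each token at lowercase-to-uppercase boundaries found by pairwise zip(tok, tok[1:]).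
import Mathlib
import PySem

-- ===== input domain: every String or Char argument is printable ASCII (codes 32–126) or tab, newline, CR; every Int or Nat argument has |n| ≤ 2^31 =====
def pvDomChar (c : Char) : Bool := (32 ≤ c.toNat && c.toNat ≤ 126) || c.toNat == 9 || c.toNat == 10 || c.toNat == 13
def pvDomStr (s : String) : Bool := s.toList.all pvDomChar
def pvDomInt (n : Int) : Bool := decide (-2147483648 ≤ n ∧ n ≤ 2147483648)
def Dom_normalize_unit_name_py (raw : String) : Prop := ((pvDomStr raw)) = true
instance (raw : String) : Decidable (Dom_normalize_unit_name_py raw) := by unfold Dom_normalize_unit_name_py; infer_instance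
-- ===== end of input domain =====

-- B replaces A's single char-by-char state machine (insert spaces, re-join, re-split)
-- by split-first-then-subdivide: tokenize, then cut each token at lowercase→uppercase
-- boundaries via pairwise zip — an alternative decomposition, same cost.


-- ===== PORT A =====
-- the loop body of A's `for ch in cleaned` (state: with_spaces so far, prev_is_lower)
def pvStepA (s : List Char × Bool) (ch : Char) : List Char × Bool :=
  ((if s.2 && PySem.Chars.isupper ch then s.1 ++ [' ', ch] else s.1 ++ [ch]),
   PySem.Chars.islower ch)

def normAuxA (cs : List Char) : List Char :=
  if cs = [] then []          -- if not raw: return ""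
  else
    let cleaned := PySem.Chars.replace (PySem.Chars.replace cs ['_'] [' ']) ['-'] [' ']
    let st := cleaned.foldl pvStepA ([], false)
    -- normalized = " ".join("".join(with_spaces).split()); return normalized.upper()
    PySem.Chars.upper (PySem.Chars.join [' '] (PySem.Chars.split₀ st.1))

def normalize_unit_name_py (raw : String) : String := String.mk (normAuxA raw.toList)

-- ===== PORT B =====
-- the inner loop body of Source B's `for a, b in zip(tok, tok[1:])` (state: parts, cur)
def pvStepB (s : List (List Char) × List Char) (ab : Char × Char) : List (List Char) × List Char :=
  if PySem.Chars.islower ab.1 && PySem.Chars.isupper ab.2 then (s.1 ++ [s.2], [ab.2])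
  else (s.1, s.2 ++ [ab.2])

-- one iteration of Source B's outer loop: the parts a single token contributes
-- ([] case unreachable from split₀: its tokens are nonempty, as tok[0] assumes in Source B)
def subTokB (t : List Char) : List (List Char) :=
  match t with
  | [] => []
  | d :: ds =>
    let r := ((d :: ds).zip ds).foldl pvStepB ([], [d])
    r.1 ++ [r.2]

def normAuxB (cs : List Char) : List Char :=
  if cs = [] then []          -- if not raw: return ""
  else
    let cleaned := PySem.Chars.replace (PySem.Chars.replace cs ['_'] [' ']) ['-'] [' ']
    let parts := (PySem.Chars.split₀ cleaned).foldl (fun out t => out ++ subTokB t) []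
    PySem.Chars.upper (PySem.Chars.join [' '] parts)

def normalize_unit_name_py_alt (raw : String) : String := String.mk (normAuxB raw.toList)

-- ===== PRECONDITION & SPEC =====
def Spec_normalize_unit_name_py (raw : String) (out : String) : Prop := out = normalize_unit_name_py_alt raw
instance (raw : String) (out : String) : Decidable (Spec_normalize_unit_name_py raw out) := by unfold Spec_normalize_unit_name_py; infer_instance

-- ===== CLAIM (what is proved, stated in full; the proofs are below) =====
def Claim_equal_normalize_unit_name_py : Prop := ∀ (raw : String), Dom_normalize_unit_name_py raw → Spec_normalize_unit_name_py raw (normalize_unit_name_py raw)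

-- ===== LEMMAS AND PROOFS =====

-- character classes: upper/lower chars are not whitespace
theorem isspace_eq_false_of_isupper (c : Char) (h : PySem.Chars.isupper c = true) :
    PySem.Chars.isspace c = false := by
  simp only [PySem.Chars.isupper, PySem.Chars.isspace, Char.le_def, Bool.and_eq_true,
    decide_eq_true_eq, UInt32.le_iff_toNat_le, Bool.or_eq_false_iff, Bool.and_eq_false_iff,
    decide_eq_false_iff_not, Char.toNat] at *
  have hA : 'A'.val.toNat = 65 := rfl
  have hZ : 'Z'.val.toNat = 90 := rfl
  omega

theorem isspace_eq_false_of_islower (c : Char) (h : PySem.Chars.islower c = true) :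
    PySem.Chars.isspace c = false := by
  simp only [PySem.Chars.islower, PySem.Chars.isspace, Char.le_def, Bool.and_eq_true,
    decide_eq_true_eq, UInt32.le_iff_toNat_le, Bool.or_eq_false_iff, Bool.and_eq_false_iff,
    decide_eq_false_iff_not, Char.toNat] at *
  have ha : 'a'.val.toNat = 97 := rfl
  have hz : 'z'.val.toNat = 122 := rfl
  omega

-- A's insertion pass as a structural recursion (proof-side view of the foldl)
def ins (p : Bool) : List Char → List Char
  | [] => []
  | c :: cs =>
    (if p && PySem.Chars.isupper c then [' ', c] else [c]) ++ ins (PySem.Chars.islower c) cs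

theorem foldA_eq (cs : List Char) : ∀ (ws : List Char) (p : Bool),
    (cs.foldl pvStepA (ws, p)).1 = ws ++ ins p cs := by
  induction cs with
  | nil => intro ws p; simp [ins]
  | cons c cs ih =>
    intro ws p
    simp only [List.foldl_cons, pvStepA, ins]
    by_cases h : (p && PySem.Chars.isupper c) = true <;> simp [h, ih]

-- the tokenizer split₀ as a forward recursion (pre = token prefix read so far)
def words' (pre : List Char) : List Char → List (List Char)
  | [] => if pre = [] then [] else [pre]
  | c :: cs =>
    if PySem.Chars.isspace c then
      (if pre = [] then words' [] cs else pre :: words' [] cs)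
    else words' (pre ++ [c]) cs

theorem split₀_go_eq (cs : List Char) : ∀ (cur : List Char) (acc : List (List Char)),
    PySem.Chars.split₀.go cs cur acc = acc.reverse ++ words' cur.reverse cs := by
  induction cs with
  | nil =>
    intro cur acc
    simp only [PySem.Chars.split₀.go, words']
    by_cases h : cur = [] <;> simp [h, List.isEmpty_iff]
  | cons c cs ih =>
    intro cur acc
    simp only [PySem.Chars.split₀.go, words']
    by_cases hs : PySem.Chars.isspace c = true
    · by_cases h : cur = [] <;> simp [hs, h, List.isEmpty_iff, ih]
    · simp only [Bool.not_eq_true] at hs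
      simp [hs, ih, List.reverse_cons]

theorem split₀_eq_words' (cs : List Char) : PySem.Chars.split₀ cs = words' [] cs := by
  simpa using split₀_go_eq cs [] []

-- the common spec: tokens of the normalized string, read left to right
-- (p = "previous char was lowercase", cur = current output token in progress)
def T (p : Bool) (cur : List Char) : List Char → List (List Char)
  | [] => if cur = [] then [] else [cur]
  | c :: cs =>
    if PySem.Chars.isspace c then
      (if cur = [] then T false [] cs else cur :: T false [] cs)
    else if p && PySem.Chars.isupper c then cur :: T (PySem.Chars.islower c) [c] cs
    else T (PySem.Chars.islower c) (cur ++ [c]) cs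

-- A side: tokenizing after space insertion = T
theorem wordsA_eq_T (cs : List Char) : ∀ (p : Bool) (cur : List Char),
    (p = true → cur ≠ []) → words' cur (ins p cs) = T p cur cs := by
  induction cs with
  | nil => intro p cur _; simp [ins, words', T]
  | cons c cs ih =>
    intro p cur hinv
    simp only [ins, T]
    by_cases hs : PySem.Chars.isspace c = true
    · have hup : PySem.Chars.isupper c = false := by
        by_contra hx; simp only [Bool.not_eq_false] at hx
        rw [isspace_eq_false_of_isupper c hx] at hs; exact Bool.false_ne_true hs
      have hl : PySem.Chars.islower c = false := by
        by_contra hx; simp only [Bool.not_eq_false] at hx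
        rw [isspace_eq_false_of_islower c hx] at hs; exact Bool.false_ne_true hs
      have hu : (p && PySem.Chars.isupper c) = false := by simp [hup]
      simp only [hu, Bool.false_eq_true, if_false, hl]
      by_cases h : cur = [] <;> simp [words', hs, h, ih false [] (by simp)]
    · simp only [Bool.not_eq_true] at hs
      by_cases hb : (p && PySem.Chars.isupper c) = true
      · have hup : PySem.Chars.isupper c = true := by
          rcases Bool.and_eq_true .. ▸ hb with ⟨_, h⟩; exact h
        have hp : p = true := by rcases Bool.and_eq_true .. ▸ hb with ⟨h, _⟩; exact h
        have hcur : cur ≠ [] := hinv hp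
        simp only [hb, if_true]
        have : words' cur (' ' :: (c :: ins (PySem.Chars.islower c) cs)) =
            cur :: words' [c] (ins (PySem.Chars.islower c) cs) := by
          simp [words', hcur, hs, show PySem.Chars.isspace ' ' = true from rfl]
        simp only [List.cons_append, List.nil_append] at this ⊢
        rw [this, ih (PySem.Chars.islower c) [c] (by intro _; simp)]
        simp [hs]
      · simp only [hb, Bool.false_eq_true, if_false]
        have : words' cur (c :: ins (PySem.Chars.islower c) cs) =
            words' (cur ++ [c]) (ins (PySem.Chars.islower c) cs) := by
          simp [words', hs]
        simp only [List.singleton_append] at this ⊢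
        rw [this, ih (PySem.Chars.islower c) (cur ++ [c]) (by intro _; simp)]
        simp [hs]

-- B side: proof-side view of subTokB's fold (init parts, current part)
def subF : List Char → List (List Char) × List Char
  | [] => ([], [])
  | d :: ds => ((d :: ds).zip ds).foldl pvStepB ([], [d])

theorem subTokB_eq (t : List Char) (h : t ≠ []) :
    subTokB t = (subF t).1 ++ [(subF t).2] := by
  match t, h with
  | d :: ds, _ => simp [subTokB, subF]

theorem zip_tail_snoc (t : List Char) (c : Char) (h : t ≠ []) :
    (t ++ [c]).zip ((t ++ [c]).tail) = t.zip t.tail ++ [(t.getLast h, c)] := by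
  match t, h with
  | d :: ts, _ =>
    induction ts generalizing d with
    | nil => rfl
    | cons e ts ih =>
      have h2 := ih e
      simp only [List.cons_append, List.tail_cons] at h2 ⊢
      rw [List.zip_cons_cons, h2 (by simp)]
      simp [List.getLast_cons]

theorem subF_snoc (t : List Char) (c : Char) (h : t ≠ []) :
    subF (t ++ [c]) = pvStepB (subF t) (t.getLast h, c) := by
  match t, h with
  | d :: ds, _ =>
    have hz := zip_tail_snoc (d :: ds) c (by simp)
    simp only [List.cons_append, List.tail_cons] at hz
    have e1 : subF ((d :: ds) ++ [c]) =
        ((d :: (ds ++ [c])).zip (ds ++ [c])).foldl pvStepB ([], [d]) := rfl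
    rw [e1, hz, List.foldl_append]
    rfl

theorem subF_snd_ne_nil (t : List Char) (h : t ≠ []) : (subF t).2 ≠ [] := by
  induction t using List.reverseRecOn with
  | nil => exact absurd rfl h
  | append_singleton t c ih =>
    by_cases ht : t = []
    · subst ht; simp [subF]
    · rw [subF_snoc t c ht]
      simp only [pvStepB]
      split_ifs <;> simp

-- "previous char was lowercase" after reading token prefix t
def prevLow (t : List Char) : Bool := PySem.Chars.islower (t.getLastD ' ')

theorem prevLow_nil : prevLow [] = false := rfl

theorem prevLow_snoc (t : List Char) (c : Char) : prevLow (t ++ [c]) = PySem.Chars.islower c := by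
  simp [prevLow]

theorem prevLow_eq_getLast (t : List Char) (h : t ≠ []) :
    prevLow t = PySem.Chars.islower (t.getLast h) := by
  simp [prevLow, List.getLastD_eq_getLast?, List.getLast?_eq_some_getLast h]

-- B side: subdividing each token of words' = T
theorem wordsB_eq_T (cs : List Char) : ∀ (cur : List Char),
    (words' cur cs).flatMap subTokB = (subF cur).1 ++ T (prevLow cur) (subF cur).2 cs := by
  induction cs with
  | nil =>
    intro cur
    by_cases h : cur = []
    · subst h; simp [words', T, subF]
    · simp [words', T, h, subTokB_eq cur h, subF_snd_ne_nil cur h]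
  | cons c cs ih =>
    intro cur
    simp only [words', T]
    by_cases hs : PySem.Chars.isspace c = true
    · by_cases h : cur = []
      · subst h
        simpa [hs, subF, prevLow_nil] using ih []
      · have h2 := subF_snd_ne_nil cur h
        simp only [hs, if_true, h, if_false, List.flatMap_cons, h2]
        rw [subTokB_eq cur h, ih []]
        simp [subF, prevLow_nil]
    · simp only [Bool.not_eq_true] at hs
      simp only [hs, Bool.false_eq_true, if_false]
      by_cases h : cur = []
      · subst h
        simp only [List.nil_append]
        rw [ih [c]]
        simp [subF, prevLow, show PySem.Chars.islower ' ' = false by decide]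
      · rw [ih (cur ++ [c]), subF_snoc cur c h, prevLow_snoc]
        simp only [pvStepB, prevLow_eq_getLast cur h]
        by_cases hb : (PySem.Chars.islower (cur.getLast h) && PySem.Chars.isupper c) = true
        · have h2 := subF_snd_ne_nil cur h
          simp [hb]
        · simp [hb]

-- the two pipelines produce the same token list
theorem tokens_eq (cs : List Char) :
    PySem.Chars.split₀ (ins false cs) = (PySem.Chars.split₀ cs).flatMap subTokB := by
  rw [split₀_eq_words', split₀_eq_words', wordsA_eq_T cs false [] (by simp)]
  have := wordsB_eq_T cs []
  simp only [subF, prevLow_nil] at this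
  simpa using this.symm

theorem normAux_eq (cs : List Char) : normAuxA cs = normAuxB cs := by
  by_cases h : cs = []
  · simp [normAuxA, normAuxB, h]
  · simp only [normAuxA, normAuxB, h, if_false]
    rw [foldA_eq _ [] false, List.nil_append, tokens_eq]
    rw [PySem.List.foldl_append_eq_flatMap subTokB (PySem.Chars.split₀ _) [], List.nil_append]

-- ===== VERDICT (by name: the statement is the Claim_ definition above) =====
theorem normalize_unit_name_py_spec : Claim_equal_normalize_unit_name_py := by
  intro raw _
  show normalize_unit_name_py raw = normalize_unit_name_py_alt raw
  unfold normalize_unit_name_py normalize_unit_name_py_alt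
  rw [normAux_eq]
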